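-- pv_equiv track=rewrite | github.com/eden-yl/algorithm | 백준/Bronze/8958. OX퀴즈/OX퀴즈.py | calculate
-- ===== SOURCE A (Python) =====
-- def calculate(answer):
--     # OOXXOXXOOO
--     result = 0
--     total = 0
--     li = list(answer)
--     for i in li:
--         if i=='O':
--             result +=1
--             total += result
--         else:
--             result = 0
--     return total
-- ===== SOURCE B (Python) =====
-- from itertools import groupby
--
-- def calculate(answer):
--     total = 0
--     for key, grp in groupby(answer, key=lambda c: c == 'O'):
--         if key:
--             k = sum(1 for _ in grp)
--             total += k * (k + 1) // 2
--     return total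
-- ===== Notes on version B (the rewrite author's own statement) =====
-- stated objective: alternative
-- what changed: Replaces the per-character running-streak accumulator with itertools.groupby run partitioning plus the closed-form triangular sum k*(k+1)//2 per run of 'O's.
import Mathlib
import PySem

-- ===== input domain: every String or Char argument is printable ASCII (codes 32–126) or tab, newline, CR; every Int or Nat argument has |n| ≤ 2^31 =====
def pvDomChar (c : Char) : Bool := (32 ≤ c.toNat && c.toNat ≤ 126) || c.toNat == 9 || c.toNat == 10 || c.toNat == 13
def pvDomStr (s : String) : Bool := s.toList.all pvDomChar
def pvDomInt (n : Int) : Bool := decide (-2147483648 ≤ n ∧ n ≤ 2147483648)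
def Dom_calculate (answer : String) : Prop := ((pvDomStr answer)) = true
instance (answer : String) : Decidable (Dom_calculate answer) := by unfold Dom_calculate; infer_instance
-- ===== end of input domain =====

-- B replaces A's per-character running-streak accumulator by a partition into maximal runs
-- with a closed-form triangular sum per 'O'-run (objective: alternative, same O(n) cost).

-- ===== PORT A =====
-- A's loop body: result/total pair updated per character.
def calcStep (st : Int × Int) (i : Char) : Int × Int :=
  if i == 'O' then (st.1 + 1, st.2 + (st.1 + 1)) else (0, st.2)

def calculate (answer : String) : Int :=
  (answer.toList.foldl calcStep (0, 0)).2

-- ===== PORT B =====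
-- groupby: split off the maximal leading run (of 'O's or of non-'O's) per recursive step;
-- an 'O'-run of length k contributes k*(k+1)//2 (PySem.Int.floordiv = Python //).
def calcRuns : List Char → Int
  | [] => 0
  | c :: rest =>
    if c == 'O' then
      let k : Int := ((1 + (rest.takeWhile (· == 'O')).length : Nat) : Int)
      PySem.Int.floordiv (k * (k + 1)) 2 + calcRuns (rest.dropWhile (· == 'O'))
    else
      calcRuns (rest.dropWhile (fun x => !(x == 'O')))
termination_by l => l.length
decreasing_by
  · exact Nat.lt_succ_of_le (List.length_dropWhile_le _ _)
  · exact Nat.lt_succ_of_le (List.length_dropWhile_le _ _)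

def calculate_alt (answer : String) : Int := calcRuns answer.toList

-- ===== PRECONDITION & SPEC =====
def Spec_calculate (answer : String) (out : Int) : Prop := out = calculate_alt answer
instance (answer : String) (out : Int) : Decidable (Spec_calculate answer out) := by unfold Spec_calculate; infer_instance

-- ===== CLAIM (what is proved, stated in full; the proofs are below) =====
def Claim_equal_calculate : Prop := ∀ (answer : String), Dom_calculate answer → Spec_calculate answer (calculate answer)

-- ===== LEMMAS AND PROOFS =====

/-- Triangular numbers, recursion form. -/
def tri : Nat → Int
  | 0 => 0
  | m + 1 => tri m + (m + 1)

theorem two_mul_tri (m : Nat) : 2 * tri m = (m : Int) * (m + 1) := by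
  induction m with
  | zero => simp [tri]
  | succ m ih => simp only [tri]; push_cast; push_cast at ih; ring_nf; ring_nf at ih; omega

theorem floordiv_tri (m : Nat) :
    PySem.Int.floordiv ((m : Int) * ((m : Int) + 1)) 2 = tri m := by
  rw [PySem.Int.floordiv_eq_ediv_of_pos (by norm_num), ← two_mul_tri m,
    Int.mul_ediv_cancel_left _ (by norm_num)]

theorem foldl_nonO (l : List Char) (t : Int)
    (h : ∀ c ∈ l, (c == 'O') = false) :
    l.foldl calcStep (0, t) = (0, t) := by
  induction l with
  | nil => rfl
  | cons c rest ih =>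
    have hc := h c (by simp)
    have hstep : calcStep (0, t) c = (0, t) := by simp [calcStep, hc]
    rw [List.foldl_cons, hstep]
    exact ih (fun d hd => h d (by simp [hd]))

theorem foldl_Orun (m : Nat) : ∀ (r t : Int),
    (List.replicate m 'O').foldl calcStep (r, t) = (r + m, t + m * r + tri m) := by
  induction m with
  | zero => intro r t; simp [tri]
  | succ m ih =>
    intro r t
    rw [List.replicate_succ, List.foldl_cons]
    have hstep : calcStep (r, t) 'O' = (r + 1, t + (r + 1)) := by simp [calcStep]
    rw [hstep, ih]
    simp only [tri, Prod.mk.injEq]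
    constructor <;> (push_cast; ring)

theorem snd_foldl_reset (l : List Char) (r t : Int)
    (h : ∀ d, l.head? = some d → (d == 'O') = false) :
    (l.foldl calcStep (r, t)).2 = (l.foldl calcStep (0, t)).2 := by
  cases l with
  | nil => rfl
  | cons d rest =>
    have hd := h d (by rfl)
    have h1 : calcStep (r, t) d = (0, t) := by simp [calcStep, hd]
    have h2 : calcStep (0, t) d = (0, t) := by simp [calcStep, hd]
    rw [List.foldl_cons, List.foldl_cons, h1, h2]

theorem head_dropWhile (p : Char → Bool) (l : List Char) :
    ∀ d, (l.dropWhile p).head? = some d → p d = false := by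
  induction l with
  | nil => intro d hd; simp [List.dropWhile] at hd
  | cons c rest ih =>
    intro d hd
    rw [List.dropWhile_cons] at hd
    by_cases hc : p c = true
    · exact ih d (by simpa [hc] using hd)
    · have hc' : p c = false := Bool.eq_false_iff.mpr hc
      simp [hc'] at hd
      subst hd
      exact hc'

theorem takeWhile_O_replicate (l : List Char) :
    l.takeWhile (· == 'O') = List.replicate (l.takeWhile (· == 'O')).length 'O' := by
  rw [List.eq_replicate_iff]
  refine ⟨rfl, fun b hb => ?_⟩
  have := List.mem_takeWhile_imp hb
  simpa using this

theorem key (l : List Char) : ∀ (t : Int),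
    (l.foldl calcStep (0, t)).2 = t + calcRuns l := by
  induction l using calcRuns.induct with
  | case1 => intro t; simp [calcRuns]
  | case2 c rest hc ih =>
    intro t
    have hceq : c = 'O' := by simpa using hc
    have hsplit : c :: rest =
        List.replicate (1 + (rest.takeWhile (· == 'O')).length) 'O'
          ++ rest.dropWhile (· == 'O') := by
      have h1 : rest = rest.takeWhile (· == 'O') ++ rest.dropWhile (· == 'O') :=
        (List.takeWhile_append_dropWhile).symm
      calc c :: rest
          = (c :: rest.takeWhile (· == 'O')) ++ rest.dropWhile (· == 'O') :=
            congrArg (c :: ·) h1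
        _ = _ := by
            congr 1
            rw [hceq]
            nth_rewrite 1 [takeWhile_O_replicate rest]
            rw [Nat.add_comm, List.replicate_succ]
    have hk : calcRuns (c :: rest) =
        PySem.Int.floordiv
          (((1 + (rest.takeWhile (· == 'O')).length : Nat) : Int) *
            (((1 + (rest.takeWhile (· == 'O')).length : Nat) : Int) + 1)) 2
          + calcRuns (rest.dropWhile (· == 'O')) := by
      rw [calcRuns]
      simp [hc]
    rw [hk]
    conv_lhs => rw [hsplit]
    rw [List.foldl_append, foldl_Orun,
      snd_foldl_reset _ _ _ (head_dropWhile (· == 'O') rest), ih,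
      floordiv_tri (1 + (rest.takeWhile (· == 'O')).length)]
    push_cast
    ring
  | case3 c rest hc ih =>
    intro t
    have hk : calcRuns (c :: rest) = calcRuns (rest.dropWhile (fun x => !(x == 'O'))) := by
      rw [calcRuns]
      simp [hc]
    have hsplit : c :: rest =
        (c :: rest).takeWhile (fun x => !(x == 'O'))
          ++ rest.dropWhile (fun x => !(x == 'O')) := by
      have h1 : c :: rest = (c :: rest).takeWhile (fun x => !(x == 'O'))
          ++ (c :: rest).dropWhile (fun x => !(x == 'O')) :=
        (List.takeWhile_append_dropWhile).symm
      rw [List.dropWhile_cons] at h1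
      simp only [hc] at h1
      exact h1
    rw [hk]
    conv_lhs => rw [hsplit]
    rw [List.foldl_append, foldl_nonO, ih]
    intro d hd
    have := List.mem_takeWhile_imp hd
    simpa using this

-- ===== VERDICT (by name: the statement is the Claim_ definition above) =====
theorem calculate_spec : Claim_equal_calculate := by
  intro answer _
  unfold Spec_calculate calculate calculate_alt
  rw [key]
  ring
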